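-- pv_equiv track=rewrite | github.com/GlacyalWolf/programingAlgoritms2 | Exams/Examen2_2019/charTriag.py | somethingInCmon
-- ===== SOURCE A (Python) =====
-- def trigram(word):
--     listTri = []
--     index = 0
--     trhe = ""
--
--     while index+2 < len(word):
--
--         for i in range(index, index+3):
--             trhe += word[i]
--
--         listTri.append(trhe)
--         trhe = ""
--         index += 1
--
--     return listTri
--
-- def somethingInCmon(word1, word2):
--     listWord1 = trigram(word1)
--     listWord2 = trigram(word2)
--
--     for i in listWord1:
--         for x in listWord2:
--             if i == x:
--                 return True
--     return False
-- ===== SOURCE B (Python) =====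
-- def somethingInCmon(word1, word2):
--     for i in range(len(word1) - 2):
--         if word1[i:i+3] in word2:
--             return True
--     return False
-- ===== Notes on version B (the rewrite author's own statement) =====
-- stated objective: simpler
-- what changed: B drops both trigram-list builds and the nested comparison loops: it slices each trigram of word1 once and tests it with Python's substring containment against the raw word2.
import Mathlib
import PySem

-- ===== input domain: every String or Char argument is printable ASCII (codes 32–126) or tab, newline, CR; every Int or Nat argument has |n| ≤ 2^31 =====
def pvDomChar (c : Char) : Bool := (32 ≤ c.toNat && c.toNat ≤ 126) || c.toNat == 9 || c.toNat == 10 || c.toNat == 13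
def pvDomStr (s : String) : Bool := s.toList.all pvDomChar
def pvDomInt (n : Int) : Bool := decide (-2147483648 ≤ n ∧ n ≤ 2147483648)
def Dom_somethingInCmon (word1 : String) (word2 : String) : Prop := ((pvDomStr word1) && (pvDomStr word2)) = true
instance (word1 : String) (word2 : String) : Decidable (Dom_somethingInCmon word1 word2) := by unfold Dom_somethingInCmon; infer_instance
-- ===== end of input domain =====

-- B replaces A's two hand-built trigram lists and nested comparison loops by a single pass
-- over word1's trigram slices tested with substring containment in word2 (simpler).


-- ===== PORT A =====
-- trigram(word): while index+2 < len(word): build trhe char by char over range(index, index+3), append, index += 1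
def pvTrigramA (word : List Char) (index : Nat) : List (List Char) :=
  if _h : index + 2 < word.length then
    ((PySem.List.pyRange (index : Int) ((index : Int) + 3) 1).foldl
        (fun trhe i =>
          match PySem.List.pyGet? word i with
          | some c => trhe ++ [c]          -- trhe += word[i]; index always in range here
          | none => trhe) [])
      :: pvTrigramA word (index + 1)
  else []
termination_by word.length - index

def somethingInCmon (word1 : String) (word2 : String) : Bool :=
  let listWord1 := pvTrigramA word1.toList 0
  let listWord2 := pvTrigramA word2.toList 0
  listWord1.any (fun i => listWord2.any (fun x => i == x))

-- ===== PORT B =====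
def somethingInCmon_alt (word1 : String) (word2 : String) : Bool :=
  (PySem.List.pyRange 0 ((PySem.Str.len word1 : Int) - 2) 1).any
    (fun i => PySem.Str.isIn (PySem.Str.slice word1 (some i) (some (i + 3))) word2)

-- ===== PRECONDITION & SPEC =====
def Spec_somethingInCmon (word1 : String) (word2 : String) (out : Bool) : Prop := out = somethingInCmon_alt word1 word2
instance (word1 : String) (word2 : String) (out : Bool) : Decidable (Spec_somethingInCmon word1 word2 out) := by unfold Spec_somethingInCmon; infer_instance

-- ===== CLAIM (what is proved, stated in full; the proofs are below) =====
def Claim_equal_somethingInCmon : Prop := ∀ (word1 : String) (word2 : String), Dom_somethingInCmon word1 word2 → Spec_somethingInCmon word1 word2 (somethingInCmon word1 word2)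

-- ===== LEMMAS AND PROOFS =====

-- The inner for-loop of trigram builds exactly the 3-char window at idx.
theorem pvTrigramA_window (w : List Char) (idx : Nat) (h : idx + 2 < w.length) :
    (PySem.List.pyRange (idx : Int) ((idx : Int) + 3) 1).foldl
        (fun trhe i =>
          match PySem.List.pyGet? w i with
          | some c => trhe ++ [c]
          | none => trhe) []
      = (w.drop idx).take 3 := by
  have h3 : ((idx : Int) + 3 - idx).toNat = 3 := by omega
  rw [PySem.List.pyRange_one, h3]
  have e1 : w.drop idx = w[idx] :: w.drop (idx + 1) := List.drop_eq_getElem_cons (by omega)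
  have e2 : w.drop (idx+1) = w[idx+1] :: w.drop (idx + 2) := List.drop_eq_getElem_cons (by omega)
  have e3 : w.drop (idx+2) = w[idx+2] :: w.drop (idx + 3) := List.drop_eq_getElem_cons (by omega)
  have g1 : w[idx]? = some w[idx] := List.getElem?_eq_getElem (by omega)
  have g2 : PySem.List.pyGet? w ((idx : Int) + 1) = some w[idx+1] := by
    have e : ((idx : Int) + 1) = ((idx + 1 : Nat) : Int) := by push_cast; ring
    rw [e, PySem.List.pyGet?_natCast, List.getElem?_eq_getElem (by omega)]
  have g3 : PySem.List.pyGet? w ((idx : Int) + 2) = some w[idx+2] := by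
    have e : ((idx : Int) + 2) = ((idx + 2 : Nat) : Int) := by push_cast; ring
    rw [e, PySem.List.pyGet?_natCast, List.getElem?_eq_getElem (by omega)]
  simp only [List.range_succ, List.range_zero, List.map_append, List.map_cons, List.map_nil,
    List.nil_append, List.foldl_append, List.foldl_cons, List.foldl_nil,
    PySem.List.pyGet?_natCast, Nat.cast_zero, Nat.cast_one, Nat.cast_ofNat, add_zero, g1, g2, g3]
  rw [e1, e2, e3]
  rfl

-- Membership characterisation of A's trigram list.
theorem mem_pvTrigramA (w : List Char) (idx : Nat) (t : List Char) :
    t ∈ pvTrigramA w idx ↔ ∃ i : Nat, idx ≤ i ∧ i + 2 < w.length ∧ t = (w.drop i).take 3 := by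
  fun_induction pvTrigramA w idx with
  | case1 idx h ih =>
    rw [pvTrigramA_window w idx h] at *
    simp only [List.mem_cons, ih]
    constructor
    · rintro (rfl | ⟨i, hi, hlen, rfl⟩)
      · exact ⟨idx, le_refl _, h, rfl⟩
      · exact ⟨i, by omega, hlen, rfl⟩
    · rintro ⟨i, hi, hlen, rfl⟩
      rcases Nat.lt_or_ge idx i with hlt | hge
      · exact Or.inr ⟨i, by omega, hlen, rfl⟩
      · have : i = idx := by omega
        subst this; exact Or.inl rfl
  | case2 idx h =>
    simp only [List.not_mem_nil, false_iff]
    rintro ⟨i, hi, hlen, _⟩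
    exact h (by omega)

-- A length-3 window is an infix of w iff it equals one of w's 3-char windows.
theorem infix_iff_window (t w : List Char) (ht : t.length = 3) :
    t <:+: w ↔ ∃ j : Nat, j + 2 < w.length ∧ t = (w.drop j).take 3 := by
  constructor
  · rintro ⟨s, u, rfl⟩
    refine ⟨s.length, by simp; omega, ?_⟩
    rw [List.append_assoc, List.drop_left, List.take_left' ht]
  · rintro ⟨j, hj, rfl⟩
    exact ⟨w.take j, (w.drop j).drop 3, by simp⟩

theorem window_length (L : List Char) (k : Nat) (h : k + 2 < L.length) :
    ((L.drop k).take 3).length = 3 := by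
  simp [List.length_take, List.length_drop]; omega

-- B's slice-containment test at offset k says: w1's window at k equals some window of w2.
theorem slice_isIn (w1 w2 : String) (k : Nat) (hk : k + 2 < w1.toList.length) :
    PySem.Str.isIn (PySem.Str.slice w1 (some (k : Int)) (some ((k : Int) + 3))) w2 = true ↔
      ∃ j : Nat, j + 2 < w2.toList.length ∧
        List.take 3 (List.drop k w1.toList) = List.take 3 (List.drop j w2.toList) := by
  have hs : (PySem.Str.slice w1 (some (k : Int)) (some ((k : Int) + 3))).toList
      = (w1.toList.drop k).take 3 := by
    have e : ((k : Int) + 3) = ((k : Int) + ((3 : Nat) : Int)) := by norm_num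
    simp only [PySem.Str.toList_slice, PySem.Chars.slice_eq_listSlice]
    rw [e, PySem.List.slice_natCast_add]
  rw [PySem.Str.isIn_iff_infix, hs, infix_iff_window _ _ (window_length _ _ hk)]

-- ===== VERDICT (by name: the statement is the Claim_ definition above) =====
theorem somethingInCmon_spec : Claim_equal_somethingInCmon := by
  intro w1 w2 _
  unfold Spec_somethingInCmon somethingInCmon somethingInCmon_alt
  rw [Bool.eq_iff_iff]
  simp only [List.any_eq_true, beq_iff_eq, mem_pvTrigramA, PySem.List.mem_pyRange_one]
  have hlen : PySem.Str.len w1 = (w1.toList.length : Int) := by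
    simp [PySem.Str.len_eq]
  constructor
  · rintro ⟨t, ⟨i, -, hi, rfl⟩, t2, ⟨j, -, hj, rfl⟩, heq⟩
    refine ⟨(i : Int), ⟨by positivity, by rw [hlen]; omega⟩, ?_⟩
    exact (slice_isIn w1 w2 i hi).mpr ⟨j, hj, heq⟩
  · rintro ⟨x, ⟨hx0, hx⟩, hin⟩
    rw [hlen] at hx
    have hk : x.toNat + 2 < w1.toList.length := by omega
    have ex : x = ((x.toNat : Nat) : Int) := by omega
    rw [ex] at hin
    obtain ⟨j, hj, heq⟩ := (slice_isIn w1 w2 x.toNat hk).mp hin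
    exact ⟨_, ⟨x.toNat, Nat.zero_le _, hk, rfl⟩, _, ⟨j, Nat.zero_le _, hj, rfl⟩, heq⟩
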